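-- pv_equiv track=rewrite | github.com/uhh-cms/topmass | alljets/production/kinfit_utils.py | appendindices
-- ===== SOURCE A (Python) =====
-- def appendindices(initial_array, target_lengths):
--     """Pad inner index-lists so each reaches its event-specific length."""
--     for i in range(len(initial_array)):
--         inner_list = initial_array[i]
--         target_length = target_lengths[i]
--         available_numbers = list(range(target_length))
--         for num in available_numbers:
--             if num not in inner_list:
--                 inner_list.append(num)
--             if len(inner_list) >= target_length:
--                 break
--     return initial_array
-- ===== SOURCE B (Python) =====
-- def appendindices(initial_array, target_lengths):
--     """Pad inner index-lists so each reaches its event-specific length."""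
--     for i, inner_list in enumerate(initial_array):
--         target_length = target_lengths[i]
--         need = target_length - len(inner_list)
--         if need <= 0:
--             continue
--         missing = [n for n in range(target_length) if n not in inner_list]
--         inner_list.extend(missing[:need])
--     return initial_array
-- ===== Notes on version B (the rewrite author's own statement) =====
-- stated objective: simpler
-- what changed: Replaces A's per-element append-with-early-break inner loop by computing need = target - len up front, skipping lists already long enough, and splicing the needed prefix of the ordered missing values in one extend.
-- intended difference: On inputs where some inner list is already at/above its positive target length but lacks 0, A appends a spurious 0 (its break test only runs after an append) while B leaves the list unchanged, which is the intended pad-up-to-length behaviour. — e.g. on appendindices([[5, 6]], [1]): A returns [[5, 6, 0]], B returns [[5, 6]]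
import Mathlib
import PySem

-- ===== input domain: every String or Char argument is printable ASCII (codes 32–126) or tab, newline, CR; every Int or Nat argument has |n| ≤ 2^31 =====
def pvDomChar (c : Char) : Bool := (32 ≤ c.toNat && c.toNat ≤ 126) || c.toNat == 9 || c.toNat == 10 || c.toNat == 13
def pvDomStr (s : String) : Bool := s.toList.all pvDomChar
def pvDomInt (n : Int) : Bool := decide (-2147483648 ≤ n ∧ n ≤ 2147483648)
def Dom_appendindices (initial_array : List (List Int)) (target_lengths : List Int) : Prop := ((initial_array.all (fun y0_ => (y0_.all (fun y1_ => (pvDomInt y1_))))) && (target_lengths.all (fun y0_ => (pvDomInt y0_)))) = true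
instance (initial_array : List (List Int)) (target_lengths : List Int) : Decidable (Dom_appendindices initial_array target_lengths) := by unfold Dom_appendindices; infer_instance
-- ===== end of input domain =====

-- B pads each inner list by computing the needed count up front and splicing a prefix of the
-- ordered missing values, instead of A's per-element append-with-early-break loop (objective:
-- simpler). A and B mutate the inner lists of initial_array in place and return the same object;
-- the Lean ports and the equivalence are about the returned value.

-- ===== PORT A =====
-- inner 'for num in available_numbers: …' loop with its early 'break'
def pvAppendLoopA (target : Int) (inner : List Int) (nums : List Int) : List Int :=
  match nums with
  | [] => inner
  | num :: rest =>
    let inner' := if num ∈ inner then inner else inner ++ [num]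
    if target ≤ (inner'.length : Int) then inner'
    else pvAppendLoopA target inner' rest

def appendindices (initial_array : List (List Int)) (target_lengths : List Int) : List (List Int) :=
  (List.range initial_array.length).foldl
    (fun arr i =>
      let inner_list := arr.getD i []
      let target_length := target_lengths.getD i 0   -- Pre_ guarantees i < target_lengths.length
      arr.set i (pvAppendLoopA target_length inner_list (PySem.List.pyRange 0 target_length 1)))
    initial_array

-- ===== PORT B =====
-- per-element body of B's loop: need up front, then extend with missing[:need]
def pvPadInner (inner : List Int) (target : Int) : List Int :=
  let need := target - (inner.length : Int)
  if need ≤ 0 then inner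
  else
    let missing := (PySem.List.pyRange 0 target 1).filter (fun n => decide (n ∉ inner))
    inner ++ missing.take need.toNat   -- missing[:need] with need > 0 is exactly 'take need'

def appendindices_alt (initial_array : List (List Int)) (target_lengths : List Int) : List (List Int) :=
  initial_array.mapIdx (fun i inner_list => pvPadInner inner_list (target_lengths.getD i 0))

-- ===== PRECONDITION & SPEC =====
-- Pre_ excludes only the inputs on which Python A raises IndexError: target_lengths shorter than initial_array.
def Pre_appendindices (initial_array : List (List Int)) (target_lengths : List Int) : Prop :=
  initial_array.length ≤ target_lengths.length
instance (initial_array : List (List Int)) (target_lengths : List Int) : Decidable (Pre_appendindices initial_array target_lengths) := by unfold Pre_appendindices; infer_instance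
def pvWitness_appendindices : List (List Int) × List Int := ([[1], [0, 2]], [3, 3])

-- On inputs where some inner list is already at/above its (positive) target length but does not
-- contain 0, A still appends a spurious 0 to it (its break test runs only after an append); B
-- leaves such a list unchanged, which is the intended 'pad up to the target length' behaviour.
def D_appendindices (initial_array : List (List Int)) (target_lengths : List Int) : Prop :=
  ∃ i : Fin initial_array.length,
    1 ≤ target_lengths.getD i 0 ∧
    target_lengths.getD i 0 ≤ (initial_array[i].length : Int) ∧
    (0 : Int) ∉ initial_array[i]
instance (initial_array : List (List Int)) (target_lengths : List Int) : Decidable (D_appendindices initial_array target_lengths) := by unfold D_appendindices; infer_instance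

def Spec_appendindices (initial_array : List (List Int)) (target_lengths : List Int) (out : List (List Int)) : Prop := ¬ D_appendindices initial_array target_lengths → out = appendindices_alt initial_array target_lengths
instance (initial_array : List (List Int)) (target_lengths : List Int) (out : List (List Int)) : Decidable (Spec_appendindices initial_array target_lengths out) := by unfold Spec_appendindices; infer_instance

def pvDiffWitness_appendindices : List (List Int) × List Int := ([[5, 6]], [1])
def pvDiffWitnessOut_appendindices : (List (List Int)) × (List (List Int)) := ([[5, 6, 0]], [[5, 6]])

-- ===== CLAIM (what is proved, stated in full; the proofs are below) =====
def Claim_unchanged_appendindices : Prop := ∀ (initial_array : List (List Int)) (target_lengths : List Int), Dom_appendindices initial_array target_lengths → Pre_appendindices initial_array target_lengths → Spec_appendindices initial_array target_lengths (appendindices initial_array target_lengths)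
def Claim_changed_appendindices : Prop := Dom_appendindices (pvDiffWitness_appendindices.1) (pvDiffWitness_appendindices.2) ∧ Pre_appendindices (pvDiffWitness_appendindices.1) (pvDiffWitness_appendindices.2) ∧ D_appendindices (pvDiffWitness_appendindices.1) (pvDiffWitness_appendindices.2) ∧ appendindices (pvDiffWitness_appendindices.1) (pvDiffWitness_appendindices.2) = pvDiffWitnessOut_appendindices.1 ∧ appendindices_alt (pvDiffWitness_appendindices.1) (pvDiffWitness_appendindices.2) = pvDiffWitnessOut_appendindices.2 ∧ pvDiffWitnessOut_appendindices.1 ≠ pvDiffWitnessOut_appendindices.2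
def Claim_exact_appendindices : Prop := ∀ (initial_array : List (List Int)) (target_lengths : List Int), Dom_appendindices initial_array target_lengths → Pre_appendindices initial_array target_lengths → D_appendindices initial_array target_lengths → appendindices initial_array target_lengths ≠ appendindices_alt initial_array target_lengths

-- ===== LEMMAS AND PROOFS =====

-- A's inner loop, started below the target, appends exactly the first 'need' missing values.
theorem pvAppendLoopA_below (target : Int) :
    ∀ (nums inner : List Int), nums.Nodup → (inner.length : Int) < target →
      pvAppendLoopA target inner nums
        = inner ++ (nums.filter (fun n => decide (n ∉ inner))).take (target - inner.length).toNat := by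
  intro nums
  induction nums with
  | nil => intro inner _ _; simp [pvAppendLoopA]
  | cons num rest ih =>
    intro inner hnd hlt
    by_cases hm : num ∈ inner
    · have hnle : ¬ target ≤ (inner.length : Int) := by omega
      simp only [pvAppendLoopA, if_pos hm, if_neg hnle]
      rw [ih inner hnd.of_cons hlt]
      simp [hm]
    · by_cases hend : target ≤ ((inner ++ [num]).length : Int)
      · have htl : target = (inner.length : Int) + 1 := by
          simp [List.length_append] at hend; omega
        have h1 : (target - (inner.length : Int)).toNat = 1 := by omega
        simp only [pvAppendLoopA, if_neg hm, if_pos hend]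
        simp [hm, h1]
      · simp only [pvAppendLoopA, if_neg hm, if_neg hend]
        have hlt' : (((inner ++ [num]).length : Nat) : Int) < target := by
          simp [List.length_append] at hend ⊢; omega
        rw [ih (inner ++ [num]) hnd.of_cons hlt']
        have hnr : num ∉ rest := (List.nodup_cons.mp hnd).1
        have hfilt : rest.filter (fun n => decide (n ∉ inner ++ [num]))
            = rest.filter (fun n => decide (n ∉ inner)) := by
          apply List.filter_congr
          intro n hn
          have hne : n ≠ num := fun h => hnr (h ▸ hn)
          simp [List.mem_append, hne]
        rw [hfilt]
        have hk : (target - (inner.length : Int)).toNat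
            = ((target - ((inner ++ [num]).length : Int)).toNat) + 1 := by
          simp [List.length_append]; omega
        simp [hm, hk, List.append_assoc]

-- per-index agreement outside the bad region
theorem inner_eq (inner : List Int) (target : Int)
    (h : ¬ (1 ≤ target ∧ target ≤ (inner.length : Int) ∧ (0 : Int) ∉ inner)) :
    pvAppendLoopA target inner (PySem.List.pyRange 0 target 1) = pvPadInner inner target := by
  by_cases hpos : target ≤ 0
  · rw [PySem.List.pyRange_one_eq_nil hpos]
    have : target - (inner.length : Int) ≤ 0 := by omega
    simp [pvAppendLoopA, pvPadInner, this]
  · rw [not_le] at hpos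
    by_cases hbig : (inner.length : Int) < target
    · rw [pvAppendLoopA_below target _ inner (PySem.List.nodup_pyRange_one 0 target) hbig]
      have hneed : ¬ target - (inner.length : Int) ≤ 0 := by omega
      simp [pvPadInner, hneed]
    · rw [not_lt] at hbig
      have h0 : (0 : Int) ∈ inner := by
        by_contra h0
        exact h ⟨by omega, by omega, h0⟩
      rw [PySem.List.pyRange_one_cons hpos]
      have hle : target ≤ (inner.length : Int) := hbig
      have : target - (inner.length : Int) ≤ 0 := by omega
      simp [pvAppendLoopA, h0, hle, pvPadInner, this]

-- A's outer loop (foldl over range with set) as an index-wise map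
theorem foldl_set_eq_mapIdx (f : Nat → List Int → List Int) :
    ∀ (n : Nat) (arr : List (List Int)),
      (List.range n).foldl (fun a i => a.set i (f i (a.getD i []))) arr
        = arr.mapIdx (fun i x => if i < n then f i x else x) := by
  intro n
  induction n with
  | zero =>
    intro arr
    simp only [List.range_zero, List.foldl_nil]
    apply List.ext_getElem <;> simp
  | succ n ih =>
    intro arr
    rw [List.range_succ, List.foldl_append, List.foldl_cons, List.foldl_nil, ih]
    apply List.ext_getElem
    · simp
    · intro j hj hj'
      simp only [List.length_mapIdx] at hj'
      simp only [List.getElem_set, List.getElem_mapIdx]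
      by_cases hjn : n = j
      · subst hjn
        simp [List.getD_eq_getElem?_getD, List.getElem?_eq_getElem hj']
      · simp only [if_neg hjn]
        by_cases hjlt : j < n
        · simp [hjlt, Nat.lt_succ_of_lt hjlt]
        · have hn1 : ¬ j < n + 1 := by omega
          simp [hjlt, hn1]

-- A as an index-wise map of its inner loop
theorem appendindices_eq_mapIdx (ia : List (List Int)) (tl : List Int) :
    appendindices ia tl
      = ia.mapIdx (fun i x =>
          pvAppendLoopA (tl.getD i 0) x (PySem.List.pyRange 0 (tl.getD i 0) 1)) := by
  unfold appendindices
  rw [foldl_set_eq_mapIdx (fun i x =>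
        pvAppendLoopA (tl.getD i 0) x (PySem.List.pyRange 0 (tl.getD i 0) 1)) ia.length ia]
  apply List.ext_getElem
  · simp
  · intro j hj hj'
    simp only [List.getElem_mapIdx]
    simp [show j < ia.length from by simpa using hj]

-- ===== VERDICT (by name: the statement is the Claim_ definition above) =====
theorem appendindices_spec : Claim_unchanged_appendindices := by
  intro ia tl _ _ hD
  rw [appendindices_eq_mapIdx]
  unfold appendindices_alt
  apply List.ext_getElem
  · simp
  · intro j hj hj'
    simp only [List.getElem_mapIdx]
    apply inner_eq
    intro hbad
    exact hD ⟨⟨j, by simpa using hj⟩, hbad.1, hbad.2.1, hbad.2.2⟩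

theorem appendindices_changed : Claim_changed_appendindices := by
  unfold Claim_changed_appendindices; decide

theorem appendindices_tight : Claim_exact_appendindices := by
  intro ia tl _ _ hD hEq
  obtain ⟨⟨i, hi⟩, h1, h2, h3⟩ := hD
  rw [appendindices_eq_mapIdx] at hEq
  unfold appendindices_alt at hEq
  have hEl := congrArg (fun l => l[i]?) hEq
  simp only [List.getElem?_mapIdx] at hEl
  rw [List.getElem?_eq_getElem hi] at hEl
  simp only [Option.map_some] at hEl
  have hfin : ia[(⟨i, hi⟩ : Fin ia.length)] = ia[i] := rfl
  have hg : tl.getD ((⟨i, hi⟩ : Fin ia.length) : Nat) 0 = tl.getD i 0 := rfl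
  rw [hfin] at h2 h3
  rw [hg] at h1 h2
  have hEq' : pvAppendLoopA (tl.getD i 0) ia[i] (PySem.List.pyRange 0 (tl.getD i 0) 1)
      = pvPadInner ia[i] (tl.getD i 0) := Option.some.inj hEl
  have hpos : (0 : Int) < tl.getD i 0 := by omega
  rw [PySem.List.pyRange_one_cons hpos] at hEq'
  have hle : tl.getD i 0 ≤ ((ia[i] ++ [(0:Int)]).length : Int) := by
    rw [List.length_append]; push_cast; omega
  have hpad : pvPadInner ia[i] (tl.getD i 0) = ia[i] := by
    simp only [pvPadInner]
    rw [if_pos (show tl.getD i 0 - ((ia[i]).length : Int) ≤ 0 by omega)]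
  rw [hpad] at hEq'
  simp only [pvAppendLoopA, if_neg h3, if_pos hle] at hEq'
  have := congrArg List.length hEq'
  simp at this
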